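-- pv_equiv track=rewrite | github.com/wangtyphoon/weather_dignostic | ncdr_crawler.py | pattern_precision
-- ===== SOURCE A (Python) =====
-- def pattern_precision(fmt: str) -> int:
--     precision = 0
--     if "%S" in fmt:
--         precision = max(precision, 5)
--     if "%M" in fmt:
--         precision = max(precision, 4)
--     if "%H" in fmt:
--         precision = max(precision, 3)
--     if "%d" in fmt:
--         precision = max(precision, 2)
--     if any(token in fmt for token in ("%m", "%b", "%B")):
--         precision = max(precision, 1)
--     return precision
-- ===== SOURCE B (Python) =====
-- def pattern_precision(fmt: str) -> int:
--     levels = {'S': 5, 'M': 4, 'H': 3, 'd': 2, 'm': 1, 'b': 1, 'B': 1}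
--     best = 0
--     for prev, cur in zip(fmt, fmt[1:]):
--         if prev == '%':
--             best = max(best, levels.get(cur, 0))
--     return best
-- ===== Notes on version B (the rewrite author's own statement) =====
-- stated objective: alternative
-- what changed: Instead of running five separate substring searches and accumulating a max, B makes one character-level pass over adjacent pairs, mapping the character following each percent sign to its precision level through a dict and keeping the running maximum.
import Mathlib
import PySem

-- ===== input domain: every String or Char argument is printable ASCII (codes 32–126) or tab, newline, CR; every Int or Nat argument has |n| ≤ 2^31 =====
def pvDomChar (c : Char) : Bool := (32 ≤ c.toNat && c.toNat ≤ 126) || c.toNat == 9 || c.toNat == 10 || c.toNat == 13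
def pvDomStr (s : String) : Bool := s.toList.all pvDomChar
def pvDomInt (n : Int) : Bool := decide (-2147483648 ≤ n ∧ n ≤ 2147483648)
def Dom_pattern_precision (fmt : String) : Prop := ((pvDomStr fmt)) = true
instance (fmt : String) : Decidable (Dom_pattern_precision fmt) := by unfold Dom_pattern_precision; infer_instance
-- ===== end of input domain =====

-- B replaces A's five separate substring searches with running max by a single character-level
-- pass over adjacent character pairs, mapping the character after each '%' to its level via a dict (alternative algorithm, same value).

-- ===== PORT A =====
def pattern_precision (fmt : String) : Int :=
  let precision : Int := 0
  let precision := if PySem.Str.isIn "%S" fmt then max precision 5 else precision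
  let precision := if PySem.Str.isIn "%M" fmt then max precision 4 else precision
  let precision := if PySem.Str.isIn "%H" fmt then max precision 3 else precision
  let precision := if PySem.Str.isIn "%d" fmt then max precision 2 else precision
  let precision := if (["%m", "%b", "%B"].any (fun t => PySem.Str.isIn t fmt)) then max precision 1 else precision
  precision

-- ===== PORT B =====
-- the literal dict `levels` of Source B
def ppLevels : PySem.Dict Char Int :=
  PySem.Dict.ofList [('S', 5), ('M', 4), ('H', 3), ('d', 2), ('m', 1), ('b', 1), ('B', 1)]

-- the for-loop of Source B: fold over zip(fmt, fmt[1:]); after a '%', best = max(best, levels.get(cur, 0))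
def pattern_precision_alt (fmt : String) : Int :=
  (fmt.toList.zip fmt.toList.tail).foldl
    (fun best pc => if pc.1 = '%' then max best (ppLevels.getD pc.2 0) else best) 0

-- ===== PRECONDITION & SPEC =====
def Spec_pattern_precision (fmt : String) (out : Int) : Prop := out = pattern_precision_alt fmt
instance (fmt : String) (out : Int) : Decidable (Spec_pattern_precision fmt out) := by unfold Spec_pattern_precision; infer_instance

-- ===== CLAIM (what is proved, stated in full; the proofs are below) =====
def Claim_equal_pattern_precision : Prop := ∀ (fmt : String), Dom_pattern_precision fmt → Spec_pattern_precision fmt (pattern_precision fmt)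

-- ===== LEMMAS AND PROOFS =====

theorem ppLevels_eq_mk : ppLevels = PySem.Dict.mk [('S', 5), ('M', 4), ('H', 3), ('d', 2), ('m', 1), ('b', 1), ('B', 1)] := by decide

-- the dict lookup in closed form
theorem ppLevels_getD (d : Char) :
    ppLevels.getD d 0 = if d = 'S' then 5 else if d = 'M' then 4 else if d = 'H' then 3
      else if d = 'd' then 2 else if d = 'm' then 1 else if d = 'b' then 1
      else if d = 'B' then (1 : Int) else 0 := by
  rw [PySem.Dict.getD_eq_get?_getD, ppLevels_eq_mk]
  simp only [PySem.Dict.get?_mk_cons, beq_iff_eq]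
  split_ifs <;> first | rfl | simp_all [eq_comm]

-- a pair of adjacent characters is exactly a length-2 infix
theorem mem_zip_tail_iff_infix (a b : Char) : ∀ l : List Char, ((a, b) ∈ l.zip l.tail) ↔ [a, b] <:+: l
  | [] => by simp
  | [x] => by simp [List.infix_cons_iff, List.cons_prefix_cons]
  | x :: y :: ys => by
    have ih := mem_zip_tail_iff_infix a b (y :: ys)
    rw [List.tail_cons] at ih
    rw [List.tail_cons, List.zip_cons_cons, List.mem_cons,
        List.infix_cons_iff, List.cons_prefix_cons, List.cons_prefix_cons, ← ih]
    simp [Prod.ext_iff]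

-- hoisting the accumulator out of B's fold
theorem foldl_max_hoist (ps : List (Char × Char)) :
    ∀ acc : Int, 0 ≤ acc →
      ps.foldl (fun best pc => if pc.1 = '%' then max best (ppLevels.getD pc.2 0) else best) acc
        = max acc (ps.foldl (fun best pc => if pc.1 = '%' then max best (ppLevels.getD pc.2 0) else best) 0) := by
  induction ps with
  | nil => intro acc h; simp; omega
  | cons p ps ih =>
    intro acc h
    have h0 : (0 : Int) ≤ ppLevels.getD p.2 0 := by rw [ppLevels_getD]; split_ifs <;> norm_num
    simp only [List.foldl_cons]
    by_cases hp : p.1 = '%'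
    · rw [if_pos hp, if_pos hp, ih (max acc (ppLevels.getD p.2 0)) (le_trans h (le_max_left _ _)),
          ih (max 0 (ppLevels.getD p.2 0)) (le_max_left _ _)]
      omega
    · rw [if_neg hp, if_neg hp, ih acc h]

-- B's fold in closed form: a max-chain over pair membership
set_option maxHeartbeats 1000000 in
theorem foldl_eq_chain : ∀ ps : List (Char × Char),
    ps.foldl (fun best pc => if pc.1 = '%' then max best (ppLevels.getD pc.2 0) else best) 0
      = (max (if ('%','S') ∈ ps then 5 else 0)
          (max (if ('%','M') ∈ ps then 4 else 0)
            (max (if ('%','H') ∈ ps then 3 else 0)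
              (max (if ('%','d') ∈ ps then 2 else 0)
                (if ('%','m') ∈ ps ∨ ('%','b') ∈ ps ∨ ('%','B') ∈ ps then (1 : Int) else 0)))))
  | [] => by simp
  | p :: ps => by
    rw [List.foldl_cons]
    rw [foldl_max_hoist ps _ (by split_ifs <;> simp)]
    rw [foldl_eq_chain ps]
    obtain ⟨c, d⟩ := p
    simp only [List.mem_cons, Prod.mk.injEq]
    by_cases hc : c = '%'
    · subst hc
      rw [ppLevels_getD]
      simp only [true_and]
      by_cases h1 : 'S' = d
      · subst h1; simp; split_ifs <;> omega
      by_cases h2 : 'M' = d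
      · subst h2; simp; split_ifs <;> omega
      by_cases h3 : 'H' = d
      · subst h3; simp; split_ifs <;> omega
      by_cases h4 : 'd' = d
      · subst h4; simp; split_ifs <;> omega
      by_cases h5 : 'm' = d
      · subst h5; simp; split_ifs <;> omega
      by_cases h6 : 'b' = d
      · subst h6; simp; split_ifs <;> omega
      by_cases h7 : 'B' = d
      · subst h7; simp; split_ifs <;> omega
      rw [if_neg (Ne.symm h1), if_neg (Ne.symm h2), if_neg (Ne.symm h3), if_neg (Ne.symm h4),
          if_neg (Ne.symm h5), if_neg (Ne.symm h6), if_neg (Ne.symm h7)]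
      simp only [h1, h2, h3, h4, h5, h6, h7, false_or]
      split_ifs <;> omega
    · have hc' : ¬('%' = c) := fun h => hc h.symm
      rw [if_neg hc]
      simp only [hc', false_and, false_or]
      split_ifs <;> omega

-- A's if-chain of running maxes in the same closed form
theorem patA_eq_chain (fmt : String) :
    pattern_precision fmt
      = (max (if PySem.Str.isIn "%S" fmt then 5 else 0)
          (max (if PySem.Str.isIn "%M" fmt then 4 else 0)
            (max (if PySem.Str.isIn "%H" fmt then 3 else 0)
              (max (if PySem.Str.isIn "%d" fmt then 2 else 0)
                (if PySem.Str.isIn "%m" fmt ∨ PySem.Str.isIn "%b" fmt ∨ PySem.Str.isIn "%B" fmt then (1 : Int) else 0))))) := by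
  simp only [pattern_precision, List.any_cons, List.any_nil, Bool.or_false, Bool.or_eq_true]
  split_ifs <;> omega

-- each of A's substring tests is a pair membership in B's zipped list
theorem isIn_percent_iff (b : Char) (fmt : String) :
    PySem.Str.isIn (String.ofList ['%', b]) fmt = true ↔ ('%', b) ∈ fmt.toList.zip fmt.toList.tail := by
  rw [PySem.Str.isIn_iff_infix, mem_zip_tail_iff_infix, String.toList_ofList]

-- ===== VERDICT (by name: the statement is the Claim_ definition above) =====
theorem pattern_precision_spec : Claim_equal_pattern_precision := by
  intro fmt _
  unfold Spec_pattern_precision pattern_precision_alt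
  rw [patA_eq_chain, foldl_eq_chain]
  rw [show "%S" = String.ofList ['%', 'S'] from rfl, show "%M" = String.ofList ['%', 'M'] from rfl,
      show "%H" = String.ofList ['%', 'H'] from rfl, show "%d" = String.ofList ['%', 'd'] from rfl,
      show "%m" = String.ofList ['%', 'm'] from rfl, show "%b" = String.ofList ['%', 'b'] from rfl,
      show "%B" = String.ofList ['%', 'B'] from rfl]
  simp only [isIn_percent_iff]
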